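-- pv_equiv track=rewrite | github.com/rmn388/adaptive-bias-lighting | analyze-color.py | check_colors
-- ===== SOURCE A (Python) =====
-- def check_colors(color_array):
--     brightest = 0
--     most_saturated = 0
--     brightest_value = 0
--     darkest_value = 768
--     most_saturated_value = 0
--     for x,colors in enumerate(color_array):
--         rgb_sum = sum(colors)
--         if rgb_sum > brightest_value:
--             brightest = x
--             brightest_value = rgb_sum
--         if rgb_sum < darkest_value:
--             darkest = x
--             darkest_value = rgb_sum
--         for color in colors:
--             for color2 in colors:
--                 color_dif = abs(color-color2)
--                 if color_dif > most_saturated_value: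
--                     most_saturated = x
--                     most_saturated_value = abs(color-color2)
--
--     return brightest, most_saturated, darkest
-- ===== SOURCE B (Python) =====
-- def check_colors(color_array):
--     sums = [sum(c) for c in color_array]
--     spans = [max(c) - min(c) if c else 0 for c in color_array]
--     bright_max = max(sums, default=0)
--     brightest = sums.index(bright_max) if bright_max > 0 else 0
--     span_max = max(spans, default=0)
--     most_saturated = spans.index(span_max) if span_max > 0 else 0
--     darkest = sums.index(min(sums))
--     return brightest, most_saturated, darkest
-- ===== Notes on version B (the rewrite author's own statement) =====
-- stated objective: faster
-- what changed: A's single loop with an O(k^2) nested pairwise |color-color2| scan per row is replaced by three whole-list passes: row sums and row spans (max-min) computed once, then the answers read off as first-index-of-extremum lookups.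
import Mathlib
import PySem

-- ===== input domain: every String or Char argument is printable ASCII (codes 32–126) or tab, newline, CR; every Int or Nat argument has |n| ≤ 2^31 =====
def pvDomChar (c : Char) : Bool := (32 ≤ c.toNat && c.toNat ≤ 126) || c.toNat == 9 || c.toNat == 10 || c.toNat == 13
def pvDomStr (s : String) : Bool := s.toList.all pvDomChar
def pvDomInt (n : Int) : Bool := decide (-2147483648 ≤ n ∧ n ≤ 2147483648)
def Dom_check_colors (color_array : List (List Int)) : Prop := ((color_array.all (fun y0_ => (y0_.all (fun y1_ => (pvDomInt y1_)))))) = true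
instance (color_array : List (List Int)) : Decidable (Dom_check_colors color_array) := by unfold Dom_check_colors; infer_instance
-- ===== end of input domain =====

-- B replaces A's O(n·k²) single-loop with nested pairwise scan by three O(n·k) whole-list passes
-- (row sums, row spans max-min, then first-index-of-extremum lookups); equivalence on the return value.

-- ===== PORT A =====
-- loop body of A's 'for x, colors in enumerate(color_array)'; state =
-- (brightest, most_saturated, brightest_value, darkest_value, most_saturated_value, darkest),
-- 'darkest' as Option Int because Python leaves it unbound until some rgb_sum < 768.
def stepA (st : Int × Int × Int × Int × Int × Option Int) (p : Int × List Int) :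
    Int × Int × Int × Int × Int × Option Int :=
  let x := p.1
  let colors := p.2
  let rgb_sum := colors.sum
  let (brightest, brightest_value) :=
    if rgb_sum > st.2.2.1 then (x, rgb_sum) else (st.1, st.2.2.1)
  let (darkest, darkest_value) :=
    if rgb_sum < st.2.2.2.1 then (some x, rgb_sum) else (st.2.2.2.2.2, st.2.2.2.1)
  let (most_saturated, most_saturated_value) :=
    colors.foldl (fun acc color =>
      colors.foldl (fun acc2 color2 =>
        if |color - color2| > acc2.2 then (x, |color - color2|) else acc2) acc)
      (st.2.1, st.2.2.2.2.1)
  (brightest, most_saturated, brightest_value, darkest_value, most_saturated_value, darkest)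

-- 'darkest' is unbound (Python: UnboundLocalError) iff no row sum < 768; Pre_ excludes that, .getD 0 is a dummy there.
def check_colors (color_array : List (List Int)) : Int × Int × Int :=
  let st := (PySem.List.enumerate color_array).foldl stepA (0, 0, 0, 768, 0, none)
  (st.1, st.2.1, (st.2.2.2.2.2).getD 0)

-- ===== PORT B =====
-- 'max(c) - min(c) if c else 0' (guard makes the extrema total; inside the guard max?/min? are some)
def spanOf (c : List Int) : Int :=
  if c = [] then 0
  else (PySem.List.max? c (fun y => y)).getD 0 - (PySem.List.min? c (fun y => y)).getD 0

def check_colors_alt (color_array : List (List Int)) : Int × Int × Int :=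
  let sums := color_array.map (fun c => c.sum)
  let spans := color_array.map spanOf
  let bright_max := PySem.List.maxD sums (fun y => y) 0
  let brightest : Int := if bright_max > 0 then ((PySem.List.index? sums bright_max).getD 0 : Int) else 0
  let span_max := PySem.List.maxD spans (fun y => y) 0
  let most_saturated : Int := if span_max > 0 then ((PySem.List.index? spans span_max).getD 0 : Int) else 0
  -- 'sums.index(min(sums))': Pre_ guarantees sums ≠ [] and min(sums) ∈ sums, so the getD defaults never fire
  let darkest : Int := ((PySem.List.index? sums ((PySem.List.min? sums (fun y => y)).getD 0)).getD 0 : Int)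
  (brightest, most_saturated, darkest)

-- ===== PRECONDITION & SPEC =====
-- Pre_ excludes exactly the inputs where A raises (UnboundLocalError: 'darkest' never assigned
-- because no row sum is < 768, including the empty list).
def Pre_check_colors (color_array : List (List Int)) : Prop :=
  ∃ c ∈ color_array, c.sum < 768

instance (color_array : List (List Int)) : Decidable (Pre_check_colors color_array) := by
  unfold Pre_check_colors; infer_instance

def pvWitness_check_colors : List (List Int) := [[10, 20, 30], [5], []]

def Spec_check_colors (color_array : List (List Int)) (out : Int × Int × Int) : Prop :=
  out = check_colors_alt color_array

instance (color_array : List (List Int)) (out : Int × Int × Int) : Decidable (Spec_check_colors color_array out) := by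
  unfold Spec_check_colors; infer_instance

-- ===== CLAIM (what is proved, stated in full; the proofs are below) =====
def Claim_equal_check_colors : Prop := ∀ (color_array : List (List Int)), Dom_check_colors color_array → Pre_check_colors color_array → Spec_check_colors color_array (check_colors color_array)

-- ===== LEMMAS AND PROOFS =====

-- the canonical value of A's loop state after processing l (indices from 0)
def canonSt (l : List (List Int)) : Int × Int × Int × Int × Int × Option Int :=
  let sums := l.map (fun c => c.sum)
  let spans := l.map spanOf
  let bv := sums.foldl max 0
  let mv := spans.foldl max 0
  let dv := sums.foldl min 768
  ( (if bv > 0 then ((PySem.List.index? sums bv).getD 0 : Int) else 0),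
    (if mv > 0 then ((PySem.List.index? spans mv).getD 0 : Int) else 0),
    bv, dv, mv,
    (if dv < 768 then some ((PySem.List.index? sums dv).getD 0 : Int) else none) )

-- running strict-improvement max over a plain list of candidate values
lemma runmax_eq (x : Int) (ds : List Int) : ∀ (s : Int × Int),
    ds.foldl (fun a d => if d > a.2 then (x, d) else a) s
      = if ds.foldl max s.2 > s.2 then (x, ds.foldl max s.2) else s := by
  induction ds with
  | nil => intro s; simp
  | cons d t ih =>
    intro s
    simp only [List.foldl_cons]
    by_cases h : d > s.2
    · rw [if_pos h, ih (x, d)]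
      have hmax : max s.2 d = d := by omega
      rw [hmax]
      have h1 := (PySem.List.le_foldl_max t d).1
      have : t.foldl max d > s.2 := by omega
      simp only [this, if_pos]
      by_cases h2 : t.foldl max d > d
      · simp [h2]
      · have : t.foldl max d = d := by omega
        simp [this]
    · have hmax : max s.2 d = s.2 := by omega
      rw [if_neg h, ih s, hmax]

-- A's nested pairwise scan collapses to one comparison with the row's span
lemma innerfold_eq (x : Int) (c : List Int) (m mv : Int) (hmv : 0 ≤ mv) :
    c.foldl (fun acc color =>
      c.foldl (fun acc2 color2 =>
        if |color - color2| > acc2.2 then (x, |color - color2|) else acc2) acc) (m, mv)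
    = if spanOf c > mv then (x, spanOf c) else (m, mv) := by
  have hflat : c.foldl (fun acc color =>
      c.foldl (fun acc2 color2 =>
        if |color - color2| > acc2.2 then (x, |color - color2|) else acc2) acc) (m, mv)
      = (c.flatMap (fun a => c.map (fun b => |a - b|))).foldl
          (fun a d => if d > a.2 then (x, d) else a) (m, mv) := by
    rw [List.foldl_flatMap]
    simp only [List.foldl_map]
  rw [hflat, runmax_eq]
  rcases eq_or_ne c [] with rfl | hne
  · simp [spanOf]; omega
  · obtain ⟨h, t, rfl⟩ := List.exists_cons_of_ne_nil hne
    have hspan : spanOf (h :: t) = t.foldl max h - t.foldl min h := by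
      simp [spanOf, PySem.List.max?_id_cons, PySem.List.min?_id_cons]
    set D := (h :: t).flatMap (fun a => (h :: t).map (fun b => |a - b|)) with hD
    have hmem : ∀ d ∈ D, d ≤ spanOf (h :: t) := by
      intro d hd
      rw [hD] at hd
      simp only [List.mem_flatMap, List.mem_map] at hd
      obtain ⟨a, ha, b, hb, rfl⟩ := hd
      have hamax := (PySem.List.le_foldl_max t h).1
      have h1 : a ≤ t.foldl max h := by
        rcases List.mem_cons.mp ha with rfl | ha'
        · exact (PySem.List.le_foldl_max t a).1
        · exact (PySem.List.le_foldl_max t h).2 a ha'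
      have h2 : t.foldl min h ≤ b := by
        rcases List.mem_cons.mp hb with rfl | hb'
        · exact (PySem.List.foldl_min_le t b).1
        · exact (PySem.List.foldl_min_le t h).2 b hb'
      have h3 : b ≤ t.foldl max h := by
        rcases List.mem_cons.mp hb with rfl | hb'
        · exact (PySem.List.le_foldl_max t b).1
        · exact (PySem.List.le_foldl_max t h).2 b hb'
      have h4 : t.foldl min h ≤ a := by
        rcases List.mem_cons.mp ha with rfl | ha'
        · exact (PySem.List.foldl_min_le t a).1
        · exact (PySem.List.foldl_min_le t h).2 a ha'
      rw [hspan]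
      rw [abs_le]; omega
    have hin : spanOf (h :: t) ∈ D := by
      have hM : t.foldl max h ∈ h :: t := by
        rcases PySem.List.foldl_max_mem t h with h' | h'
        · rw [h']; exact List.mem_cons_self
        · exact List.mem_cons_of_mem h h'
      have hm : t.foldl min h ∈ h :: t := by
        rcases PySem.List.foldl_min_mem t h with h' | h'
        · rw [h']; exact List.mem_cons_self
        · exact List.mem_cons_of_mem h h'
      have hle : t.foldl min h ≤ t.foldl max h := by
        have := (PySem.List.le_foldl_max t h).1
        have := (PySem.List.foldl_min_le t h).1
        omega
      rw [hD]
      simp only [List.mem_flatMap, List.mem_map]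
      refine ⟨t.foldl max h, hM, t.foldl min h, hm, ?_⟩
      rw [hspan, abs_of_nonneg (by omega)]
    set T := D.foldl max mv with hT
    have hTge : mv ≤ T := (PySem.List.le_foldl_max D mv).1
    have hTmem := PySem.List.foldl_max_mem D mv
    have hTub : ∀ d ∈ D, d ≤ T := (PySem.List.le_foldl_max D mv).2
    by_cases hgt : spanOf (h :: t) > mv
    · have h1 : spanOf (h :: t) ≤ T := hTub _ hin
      have h2 : T ≤ spanOf (h :: t) := by
        rcases hTmem with h' | h'
        · omega
        · exact hmem _ h'
      have : T = spanOf (h :: t) := le_antisymm h2 h1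
      rw [this]
    · have h2 : T ≤ mv := by
        rcases hTmem with h' | h'
        · omega
        · have := hmem _ h'; omega
      have : T = mv := le_antisymm h2 hTge
      rw [this]
      simp [hgt]

-- snoc step of the running argmax (first index of the maximum, 0 when the max is ≤ the initial 0)
lemma idxmax_snoc (s : List Int) (v : Int) (x : Int) (hx : x = (s.length : Int)) :
    (if ((s ++ [v]).foldl max 0) > 0
      then (((PySem.List.index? (s ++ [v]) ((s ++ [v]).foldl max 0)).getD 0 : Int)) else 0)
    = if v > s.foldl max 0 then x
      else (if s.foldl max 0 > 0 then ((PySem.List.index? s (s.foldl max 0)).getD 0 : Int) else 0) := by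
  have happ : (s ++ [v]).foldl max 0 = max (s.foldl max 0) v := by
    rw [List.foldl_append]; simp
  have h0 : (0:Int) ≤ s.foldl max 0 := (PySem.List.le_foldl_max s 0).1
  by_cases h : v > s.foldl max 0
  · have hmax : max (s.foldl max 0) v = v := by omega
    have hnot : v ∉ s := by
      intro hv
      have := (PySem.List.le_foldl_max s 0).2 v hv
      omega
    rw [happ, hmax, if_pos (by omega),
      PySem.List.index?_append_singleton_self s v hnot]
    simp [h, hx]
  · have hmax : max (s.foldl max 0) v = s.foldl max 0 := by omega
    rw [happ, hmax, if_neg h]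
    by_cases h2 : s.foldl max 0 > 0
    · have hmem : s.foldl max 0 ∈ s := by
        rcases PySem.List.foldl_max_mem s 0 with h' | h'
        · omega
        · exact h'
      rw [PySem.List.index?_append_of_mem [v] hmem]
    · simp [h2]

-- snoc step of the running argmin against the 768 sentinel ('darkest' stays none above it)
lemma idxmin_snoc (s : List Int) (v : Int) (x : Int) (hx : x = (s.length : Int)) :
    (if ((s ++ [v]).foldl min 768) < 768
      then some (((PySem.List.index? (s ++ [v]) ((s ++ [v]).foldl min 768)).getD 0 : Int)) else none)
    = if v < s.foldl min 768 then some x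
      else (if s.foldl min 768 < 768 then some ((PySem.List.index? s (s.foldl min 768)).getD 0 : Int) else none) := by
  have happ : (s ++ [v]).foldl min 768 = min (s.foldl min 768) v := by
    rw [List.foldl_append]; simp
  have h0 : s.foldl min 768 ≤ 768 := (PySem.List.foldl_min_le s 768).1
  by_cases h : v < s.foldl min 768
  · have hmin : min (s.foldl min 768) v = v := by omega
    have hnot : v ∉ s := by
      intro hv
      have := (PySem.List.foldl_min_le s 768).2 v hv
      omega
    rw [happ, hmin, if_pos (by omega),
      PySem.List.index?_append_singleton_self s v hnot]
    simp [h, hx]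
  · have hmin : min (s.foldl min 768) v = s.foldl min 768 := by omega
    rw [happ, hmin, if_neg h]
    by_cases h2 : s.foldl min 768 < 768
    · have hmem : s.foldl min 768 ∈ s := by
        rcases PySem.List.foldl_min_mem s 768 with h' | h'
        · omega
        · exact h'
      rw [PySem.List.index?_append_of_mem [v] hmem]
    · simp [h2]

-- A's whole loop computes the canonical state
lemma foldA_eq (l : List (List Int)) :
    (PySem.List.enumerate l).foldl stepA (0, 0, 0, 768, 0, none) = canonSt l := by
  induction l using List.reverseRecOn with
  | nil => simp [PySem.List.enumerate, canonSt]
  | append_singleton l c ih =>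
    rw [show PySem.List.enumerate (l ++ [c]) = PySem.List.enumerate (l ++ [c]) 0 from rfl,
      PySem.List.enumerate_append]
    rw [List.foldl_append]
    rw [show (PySem.List.enumerate l 0) = PySem.List.enumerate l from rfl, ih]
    show stepA (canonSt l) ((0 + (l.length : Int), c)) = canonSt (l ++ [c])
    have hmv0 : (0:Int) ≤ (l.map spanOf).foldl max 0 := (PySem.List.le_foldl_max _ 0).1
    simp only [stepA, canonSt, List.map_append, List.map_cons, List.map_nil]
    rw [innerfold_eq _ _ _ _ hmv0]
    rw [idxmax_snoc (List.map (fun c => c.sum) l) c.sum (0 + (l.length : Int)) (by simp),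
      idxmax_snoc (List.map spanOf l) (spanOf c) (0 + (l.length : Int)) (by simp),
      idxmin_snoc (List.map (fun c => c.sum) l) c.sum (0 + (l.length : Int)) (by simp)]
    simp only [List.foldl_append, List.foldl_cons, List.foldl_nil]
    split_ifs <;> simp_all <;> omega

-- maxD against default 0 asks the same question as the running max started at 0
lemma maxD_if_eq (s : List Int) :
    (if PySem.List.maxD s (fun y => y) 0 > 0
      then ((PySem.List.index? s (PySem.List.maxD s (fun y => y) 0)).getD 0 : Int) else 0)
    = if s.foldl max 0 > 0 then ((PySem.List.index? s (s.foldl max 0)).getD 0 : Int) else 0 := by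
  cases s with
  | nil => decide
  | cons h t =>
    have hmaxD : PySem.List.maxD (h :: t) (fun y => y) 0 = t.foldl max h := by
      simp [PySem.List.maxD, PySem.List.max?_id_cons]
    have hBV : (h :: t).foldl max 0 = max 0 (t.foldl max h) := by
      rw [List.foldl_cons]
      exact List.foldl_assoc
    rw [hmaxD, hBV]
    by_cases h1 : t.foldl max h > 0
    · have h2 : max 0 (t.foldl max h) = t.foldl max h := by omega
      rw [h2]
    · have h2 : max 0 (t.foldl max h) = 0 := by omega
      simp [h1, h2]

-- B agrees with the canonical state on every input satisfying Pre_
lemma altB_eq (l : List (List Int)) (hpre : Pre_check_colors l) :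
    check_colors_alt l = ((canonSt l).1, (canonSt l).2.1, ((canonSt l).2.2.2.2.2).getD 0) := by
  obtain ⟨c0, hc0, hlt⟩ := hpre
  cases l with
  | nil => cases hc0
  | cons a t =>
    simp only [check_colors_alt, canonSt]
    refine Prod.ext (maxD_if_eq _) (Prod.ext (maxD_if_eq _) ?_)
    -- darkest component
    have hmin? : PySem.List.min? (List.map (fun c => c.sum) (a :: t)) (fun y => y)
        = some ((List.map (fun c => c.sum) t).foldl min a.sum) := by
      rw [List.map_cons]
      exact PySem.List.min?_id_cons _ _
    set mn := (List.map (fun c => c.sum) t).foldl min a.sum with hmn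
    have hle := PySem.List.foldl_min_le (List.map (fun c => c.sum) t) a.sum
    have hmlt : mn < 768 := by
      rcases List.mem_cons.mp hc0 with rfl | hc'
      · omega
      · have : c0.sum ∈ List.map (fun c => c.sum) t := List.mem_map_of_mem hc'
        have := hle.2 _ this
        omega
    have hDV : (List.map (fun c => c.sum) (a :: t)).foldl min 768 = mn := by
      rw [List.map_cons, List.foldl_cons]
      have : min (768:Int) a.sum = min 768 a.sum := rfl
      calc (List.map (fun c => c.sum) t).foldl min (min 768 a.sum)
          = min 768 ((List.map (fun c => c.sum) t).foldl min a.sum) := List.foldl_assoc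
        _ = mn := by omega
    rw [hmin?, hDV]
    simp [hmlt]

-- ===== VERDICT (by name: the statement is the Claim_ definition above) =====
theorem check_colors_spec : Claim_equal_check_colors := by
  intro l _ hpre
  unfold Spec_check_colors
  rw [check_colors, altB_eq l hpre, foldA_eq]
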